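-- pv_equiv track=rewrite | github.com/BrianLiu0127/pentopoint | Temp.py | name_reduction
-- ===== SOURCE A (Python) =====
-- def name_reduction(product_name, all_keywords):
--     results = []
--     for idx, string in enumerate(all_keywords):
--         index = product_name.find(string)
--         if index != -1:
--             results.append(index)
--     if results != []:
--         return product_name[results[len(results)-1]:]
--     return product_name
-- ===== SOURCE B (Python) =====
-- def name_reduction(product_name, all_keywords):
--     for keyword in reversed(all_keywords):
--         index = product_name.find(keyword)
--         if index != -1:
--             return product_name[index:]
--     return product_name
-- ===== Notes on version B (the rewrite author's own statement) =====
-- stated objective: simpler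
-- what changed: Scans the keywords backwards and returns at the first match instead of accumulating every match index in a list and indexing its last element; no accumulator, early return.
import Mathlib
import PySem

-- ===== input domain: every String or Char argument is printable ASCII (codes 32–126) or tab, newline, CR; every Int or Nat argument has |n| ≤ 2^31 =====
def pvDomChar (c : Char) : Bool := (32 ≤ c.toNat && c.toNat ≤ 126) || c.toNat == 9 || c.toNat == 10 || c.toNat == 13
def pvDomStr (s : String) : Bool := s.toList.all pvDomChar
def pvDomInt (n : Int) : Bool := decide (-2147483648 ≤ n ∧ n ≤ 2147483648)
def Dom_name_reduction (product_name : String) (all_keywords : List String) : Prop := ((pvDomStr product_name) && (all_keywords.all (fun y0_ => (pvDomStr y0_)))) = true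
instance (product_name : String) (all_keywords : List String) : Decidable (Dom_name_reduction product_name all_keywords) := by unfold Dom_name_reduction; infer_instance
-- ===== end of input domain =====

-- B scans the keywords backwards and returns at the first match (simpler: no accumulator list, no last-element indexing).

-- ===== PORT A =====
def name_reduction (product_name : String) (all_keywords : List String) : String :=
  let results : List Int := all_keywords.foldl
    (fun results string =>
      let index := PySem.Str.find product_name string
      if index ≠ -1 then results ++ [index] else results)
    []
  if results ≠ [] then
    -- results[len(results)-1] is in range because results ≠ []
    (PySem.List.pyGet? results ((results.length : Int) - 1)).elim product_name
      (fun i => PySem.Str.slice product_name (some i) none)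
  else product_name

-- ===== PORT B =====
def nrGo (product_name : String) : List String → String
  | [] => product_name
  | keyword :: rest =>
    let index := PySem.Str.find product_name keyword
    if index ≠ -1 then PySem.Str.slice product_name (some index) none
    else nrGo product_name rest

def name_reduction_alt (product_name : String) (all_keywords : List String) : String :=
  nrGo product_name all_keywords.reverse

-- ===== PRECONDITION & SPEC =====
def Spec_name_reduction (product_name : String) (all_keywords : List String) (out : String) : Prop := out = name_reduction_alt product_name all_keywords
instance (product_name : String) (all_keywords : List String) (out : String) : Decidable (Spec_name_reduction product_name all_keywords out) := by unfold Spec_name_reduction; infer_instance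

-- ===== CLAIM (what is proved, stated in full; the proofs are below) =====
def Claim_equal_name_reduction : Prop := ∀ (product_name : String) (all_keywords : List String), Dom_name_reduction product_name all_keywords → Spec_name_reduction product_name all_keywords (name_reduction product_name all_keywords)

-- ===== LEMMAS AND PROOFS =====

-- generic: find? is the head of the filtered list
theorem find?_eq_head?_filter' {a : Type} (q : a → Bool) (l : List a) :
    l.find? q = (l.filter q).head? := by
  induction l with
  | nil => simp
  | cons x l ih =>
    cases hq : q x
    · rw [List.find?_cons_of_neg (by simp [hq]), List.filter_cons_of_neg (by simp [hq]), ih]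
    · rw [List.find?_cons_of_pos hq, List.filter_cons_of_pos hq, List.head?_cons]

-- A's accumulator characterised: the f-values of the matching keywords, in order.
theorem nr_foldl_acc (f : String → Int) (ks : List String) (acc : List Int) :
    ks.foldl (fun r s => let i := f s; if i ≠ -1 then r ++ [i] else r) acc
      = acc ++ (ks.filter (fun s => f s ≠ -1)).map f := by
  induction ks generalizing acc with
  | nil => simp
  | cons k ks ih =>
    simp only [List.foldl_cons, List.filter_cons]
    rw [ih]
    by_cases h : f k = -1 <;> simp [h]

-- B's loop characterised: the first matching keyword decides.
theorem nrGo_eq_find? (p : String) (l : List String) :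
    nrGo p l = (l.find? (fun s => PySem.Str.find p s ≠ -1)).elim p
      (fun k => PySem.Str.slice p (some (PySem.Str.find p k)) none) := by
  induction l with
  | nil => simp [nrGo]
  | cons k l ih =>
    rw [nrGo, List.find?_cons]
    by_cases h : PySem.Str.find p k = -1
    · rw [if_neg (by simpa using h), ih]
      have hd : (decide (PySem.Str.find p k ≠ -1)) = false := by simpa using h
      rw [hd]
    · rw [if_pos h]
      have hd : (decide (PySem.Str.find p k ≠ -1)) = true := by simpa using h
      rw [hd]
      rfl

theorem name_reduction_spec' (p : String) (ks : List String) :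
    name_reduction p ks = name_reduction_alt p ks := by
  unfold name_reduction name_reduction_alt
  rw [nrGo_eq_find?, nr_foldl_acc (PySem.Str.find p) ks [], List.nil_append]
  set f : String → Int := PySem.Str.find p with hf
  set c : String → Bool := fun s => decide (f s ≠ -1) with hc
  rw [find?_eq_head?_filter', List.filter_reverse, List.head?_reverse]
  by_cases hne : ks.filter c = []
  · simp [hne]
  · have hm : (ks.filter c).map f ≠ [] := by simp [hne]
    have hlen : 1 ≤ ((ks.filter c).map f).length := by
      cases h' : (ks.filter c).map f with
      | nil => exact absurd h' hm
      | cons a l => simp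
    have hcast : (((ks.filter c).map f).length : Int) - 1
        = ((((ks.filter c).map f).length - 1 : Nat) : Int) := by omega
    rw [if_pos hm, hcast, PySem.List.pyGet?_natCast]
    rw [← List.getLast?_eq_getElem?, List.getLast?_map]
    cases h' : (ks.filter c).getLast? with
    | none => rw [List.getLast?_eq_none_iff] at h'; exact absurd h' hne
    | some k => simp
-- ===== VERDICT (by name: the statement is the Claim_ definition above) =====
theorem name_reduction_spec : Claim_equal_name_reduction := by
  intro p ks _
  exact name_reduction_spec' p ks
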